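-- pv_equiv track=rewrite | github.com/pypi-data/pypi-mirror-86 | packages/plotpipe2d.py/plotpipe2d.py-1.0-py3.7.egg/EGG-INFO/scripts/plotpipe2d.py | format_isotope
-- ===== SOURCE A (Python) =====
-- from itertools import groupby
--
-- def format_isotope(label):
--     """Format an isotope string into latex"""
--     # Parse the starter numbers
--     groups = [list(g) for _,g  in groupby(label, key=lambda c: c.isdigit())]
--
--     if len(groups) > 1:
--         number = ''.join(groups[0])
--         rest = ''.join([''.join(g) for g in groups[1:]])
--         return "$^{{{}}}${}".format(number, rest)
--     else:
--         return label
-- ===== SOURCE B (Python) =====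
-- def format_isotope(label):
--     """Format an isotope string into latex"""
--     if not label:
--         return label
--     first_is_digit = label[0].isdigit()
--     for i, c in enumerate(label):
--         if c.isdigit() != first_is_digit:
--             return "$^{{{}}}${}".format(label[:i], label[i:])
--     return label
-- ===== Notes on version B (the rewrite author's own statement) =====
-- stated objective: simpler
-- what changed: Replaces itertools.groupby group materialization with a single scan that finds the first digit/non-digit class boundary and slices there.
import Mathlib
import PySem

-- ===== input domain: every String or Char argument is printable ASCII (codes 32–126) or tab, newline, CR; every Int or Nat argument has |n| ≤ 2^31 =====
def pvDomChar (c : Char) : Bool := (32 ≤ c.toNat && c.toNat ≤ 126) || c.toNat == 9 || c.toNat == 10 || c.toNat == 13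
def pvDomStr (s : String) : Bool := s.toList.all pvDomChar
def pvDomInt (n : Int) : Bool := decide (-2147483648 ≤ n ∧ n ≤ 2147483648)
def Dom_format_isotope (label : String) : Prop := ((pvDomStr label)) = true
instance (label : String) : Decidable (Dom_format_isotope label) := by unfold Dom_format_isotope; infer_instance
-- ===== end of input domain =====

-- B replaces A's groupby group materialization with a single scan to the first
-- digit/non-digit class boundary (objective: simpler; same behaviour, no speed claim).

-- ===== PORT A =====
-- itertools.groupby over the characters, keyed by isdigit: consecutive runs of one class.
def grpA : List Char → List (List Char)
  | [] => []
  | c :: cs =>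
    (c :: cs.takeWhile (fun x => x.isDigit == c.isDigit)) ::
      grpA (cs.dropWhile (fun x => x.isDigit == c.isDigit))
termination_by l => l.length
decreasing_by
  have := List.length_dropWhile_le (p := fun x => x.isDigit == c.isDigit) (l := cs)
  simp; omega

def format_isotope (label : String) : String :=
  let groups := grpA label.toList
  if groups.length > 1 then
    let number := String.ofList (groups.headD [])
    let rest := String.ofList (groups.drop 1).flatten
    "$^{" ++ number ++ "}$" ++ rest
  else label

-- ===== PORT B =====
-- B's scan loop: walk the characters after the first, carrying the prefix seen so far;
-- return the split at the first character whose digit-class differs, none if no boundary.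
def scanB (d : Bool) (acc : List Char) : List Char → Option (List Char × List Char)
  | [] => none
  | x :: xs => if x.isDigit != d then some (acc, x :: xs) else scanB d (acc ++ [x]) xs

def format_isotope_alt (label : String) : String :=
  match label.toList with
  | [] => label
  | c :: cs =>
    match scanB c.isDigit [c] cs with
    | none => label
    | some (pre, suf) => "$^{" ++ String.ofList pre ++ "}$" ++ String.ofList suf

-- ===== PRECONDITION & SPEC =====
def Spec_format_isotope (label : String) (out : String) : Prop := out = format_isotope_alt label
instance (label : String) (out : String) : Decidable (Spec_format_isotope label out) := by unfold Spec_format_isotope; infer_instance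

-- ===== CLAIM (what is proved, stated in full; the proofs are below) =====
def Claim_equal_format_isotope : Prop := ∀ (label : String), Dom_format_isotope label → Spec_format_isotope label (format_isotope label)

-- ===== LEMMAS AND PROOFS =====

theorem grpA_nil : grpA [] = [] := by rw [grpA]

theorem grpA_cons (c : Char) (cs : List Char) :
    grpA (c :: cs) =
      (c :: cs.takeWhile (fun x => x.isDigit == c.isDigit)) ::
        grpA (cs.dropWhile (fun x => x.isDigit == c.isDigit)) := by
  rw [grpA]

theorem grpA_flatten : ∀ (l : List Char), (grpA l).flatten = l := by
  intro l
  induction hn : l.length using Nat.strong_induction_on generalizing l with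
  | _ n ih =>
    cases l with
    | nil => simp [grpA_nil]
    | cons c cs =>
      rw [grpA_cons]
      have hle := List.length_dropWhile_le (p := fun x => x.isDigit == c.isDigit) (l := cs)
      rw [List.flatten_cons,
        ih _ (by simp at hn; omega) _ rfl]
      simp [List.takeWhile_append_dropWhile]

theorem grpA_eq_nil_iff (l : List Char) : grpA l = [] ↔ l = [] := by
  cases l with
  | nil => simp [grpA_nil]
  | cons c cs => rw [grpA_cons]; simp

theorem scanB_eq (d : Bool) : ∀ (l acc : List Char),
    scanB d acc l =
      if l.dropWhile (fun x => x.isDigit == d) = [] then none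
      else some (acc ++ l.takeWhile (fun x => x.isDigit == d),
                 l.dropWhile (fun x => x.isDigit == d)) := by
  intro l
  induction l with
  | nil => intro acc; simp [scanB]
  | cons x xs ih =>
    intro acc
    by_cases h : x.isDigit = d
    · have hb : (x.isDigit != d) = false := by simp [h]
      rw [scanB, hb, if_neg (by simp), ih,
        List.dropWhile_cons, List.takeWhile_cons]
      simp [h]
    · have hb : (x.isDigit != d) = true := by simp [h]
      rw [scanB, hb, if_pos rfl, List.dropWhile_cons, List.takeWhile_cons]
      simp [h]

theorem format_isotope_spec : Claim_equal_format_isotope := by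
  intro label _
  unfold Spec_format_isotope format_isotope format_isotope_alt
  cases hl : label.toList with
  | nil => simp [grpA_nil]
  | cons c cs =>
    rw [grpA_cons]
    dsimp only
    rw [scanB_eq]
    by_cases hd : cs.dropWhile (fun x => x.isDigit == c.isDigit) = []
    · rw [if_pos hd]
      have : grpA (cs.dropWhile (fun x => x.isDigit == c.isDigit)) = [] :=
        (grpA_eq_nil_iff _).mpr hd
      simp [this]
    · rw [if_neg hd]
      have hne : grpA (cs.dropWhile (fun x => x.isDigit == c.isDigit)) ≠ [] :=
        fun h => hd ((grpA_eq_nil_iff _).mp h)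
      have hlen : 0 < (grpA (cs.dropWhile (fun x => x.isDigit == c.isDigit))).length :=
        List.length_pos_iff.mpr hne
      rw [if_pos (by simp; omega)]
      simp [grpA_flatten]
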